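-- pv_equiv track=rewrite | github.com/lunacf/110109-Luna-C2 | desafio_productos/desafio_productos.py | compararUsuariosV1
-- ===== SOURCE A (Python) =====
-- def compararUsuariosV1(usuario1, usuario2):
--     dictComparaciones = {
--         "comun": [], # interseccion
--         "exclusivos": [], # diferencia
--         "total": [] # union
--     }
--     for item in usuario1:
--         if item in usuario2:
--             dictComparaciones["comun"].append(item)
--         else:
--             dictComparaciones["exclusivos"].append(item)
--         dictComparaciones["total"].append(item)
--     return dictComparaciones
-- ===== SOURCE B (Python) =====
-- def compararUsuariosV1(usuario1, usuario2):
--     # Divide and conquer: split the list in halves, solve each half,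
--     # combine the three result lists by concatenation (order preserved).
--     def conquer(items):
--         if not items:
--             return [], [], []
--         if len(items) == 1:
--             x = items[0]
--             if x in usuario2:
--                 return [x], [], [x]
--             return [], [x], [x]
--         mid = len(items) // 2
--         c1, e1, t1 = conquer(items[:mid])
--         c2, e2, t2 = conquer(items[mid:])
--         return c1 + c2, e1 + e2, t1 + t2
--     comun, exclusivos, total = conquer(usuario1)
--     return {"comun": comun, "exclusivos": exclusivos, "total": total}
-- ===== Notes on version B (the rewrite author's own statement) =====
-- stated objective: alternative
-- what changed: Replaces A's single interleaved loop appending into three dict-held lists with a divide-and-conquer recursion that splits usuario1 in halves, classifies singletons, and combines the three partial result lists by concatenation.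
import Mathlib
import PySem

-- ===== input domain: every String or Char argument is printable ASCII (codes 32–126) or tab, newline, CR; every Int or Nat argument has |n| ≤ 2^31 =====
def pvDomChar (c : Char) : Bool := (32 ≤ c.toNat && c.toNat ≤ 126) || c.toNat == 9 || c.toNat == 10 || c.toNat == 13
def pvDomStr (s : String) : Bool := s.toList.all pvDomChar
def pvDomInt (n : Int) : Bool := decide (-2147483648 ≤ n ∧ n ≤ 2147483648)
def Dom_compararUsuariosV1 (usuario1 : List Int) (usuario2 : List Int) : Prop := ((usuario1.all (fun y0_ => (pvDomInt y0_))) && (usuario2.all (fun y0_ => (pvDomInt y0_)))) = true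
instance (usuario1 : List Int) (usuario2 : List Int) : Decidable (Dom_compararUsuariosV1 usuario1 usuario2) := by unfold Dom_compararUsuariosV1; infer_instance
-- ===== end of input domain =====

-- B replaces A's single interleaved accumulator loop by a divide-and-conquer recursion over halves (alternative decomposition; not claimed faster).


-- ===== PORT A =====
-- One interleaved loop appending each item into the three lists held by the dict.
def compararUsuariosV1 (usuario1 : List Int) (usuario2 : List Int) : List (String × List Int) :=
  let st := usuario1.foldl
    (fun (acc : List Int × List Int × List Int) item =>
      if usuario2.contains item then (acc.1 ++ [item], acc.2.1, acc.2.2 ++ [item])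
      else (acc.1, acc.2.1 ++ [item], acc.2.2 ++ [item]))
    ([], [], [])
  [("comun", st.1), ("exclusivos", st.2.1), ("total", st.2.2)]

-- ===== PORT B =====
-- B's helper conquer: split in halves (items[:mid] / items[mid:] as PySem slices),
-- classify singletons, combine the three partial lists by concatenation.
def pvConquer (usuario2 : List Int) (items : List Int) : List Int × List Int × List Int :=
  match items with
  | [] => ([], [], [])
  | [x] => if usuario2.contains x then ([x], [], [x]) else ([], [x], [x])
  | a :: b :: rest =>
    let items' := a :: b :: rest
    let mid : Nat := items'.length / 2
    let st1 := pvConquer usuario2 (PySem.List.slice items' none (some (mid : Int)))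
    let st2 := pvConquer usuario2 (PySem.List.slice items' (some (mid : Int)) none)
    (st1.1 ++ st2.1, st1.2.1 ++ st2.2.1, st1.2.2 ++ st2.2.2)
termination_by items.length
decreasing_by
  · rw [PySem.List.slice_to_natCast]; simp; omega
  · rw [PySem.List.slice_from_natCast]; simp; omega

def compararUsuariosV1_alt (usuario1 : List Int) (usuario2 : List Int) : List (String × List Int) :=
  let st := pvConquer usuario2 usuario1
  [("comun", st.1), ("exclusivos", st.2.1), ("total", st.2.2)]

-- ===== PRECONDITION & SPEC =====
def Spec_compararUsuariosV1 (usuario1 : List Int) (usuario2 : List Int) (out : List (String × List Int)) : Prop := out = compararUsuariosV1_alt usuario1 usuario2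
instance (usuario1 : List Int) (usuario2 : List Int) (out : List (String × List Int)) : Decidable (Spec_compararUsuariosV1 usuario1 usuario2 out) := by unfold Spec_compararUsuariosV1; infer_instance

-- ===== CLAIM (what is proved, stated in full; the proofs are below) =====
def Claim_equal_compararUsuariosV1 : Prop := ∀ (usuario1 : List Int) (usuario2 : List Int), Dom_compararUsuariosV1 usuario1 usuario2 → Spec_compararUsuariosV1 usuario1 usuario2 (compararUsuariosV1 usuario1 usuario2)

-- ===== LEMMAS AND PROOFS =====
theorem pvFoldInv (u2 : List Int) (u1 c e t : List Int) :
    u1.foldl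
      (fun (acc : List Int × List Int × List Int) item =>
        if item ∈ u2 then (acc.1 ++ [item], acc.2.1, acc.2.2 ++ [item])
        else (acc.1, acc.2.1 ++ [item], acc.2.2 ++ [item]))
      (c, e, t)
    = (c ++ u1.filter (fun x => decide (x ∈ u2)),
       e ++ u1.filter (fun x => !decide (x ∈ u2)),
       t ++ u1) := by
  induction u1 generalizing c e t with
  | nil => simp
  | cons h tl ih =>
    simp only [List.foldl_cons]
    by_cases hm : h ∈ u2
    · rw [if_pos hm, ih]; simp [hm]
    · rw [if_neg hm, ih]; simp [hm]

theorem pvConquerEq (u2 items : List Int) :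
    pvConquer u2 items
    = (items.filter (fun x => u2.contains x),
       items.filter (fun x => !u2.contains x),
       items) := by
  fun_induction pvConquer u2 items
  case case1 => simp
  case case2 x h => simp at h; simp [h]
  case case3 x h => simp at h; simp [h]
  case case4 =>
    rename_i a b rest items' mid st1 st2 ih2 ih1
    simp only [st1, st2, items', mid, PySem.List.slice_to_natCast,
      PySem.List.slice_from_natCast] at ih1 ih2 ⊢
    rw [ih1, ih2]
    simp [← List.filter_append]

-- ===== VERDICT (by name: the statement is the Claim_ definition above) =====
theorem compararUsuariosV1_spec : Claim_equal_compararUsuariosV1 := by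
  intro u1 u2 _
  unfold Spec_compararUsuariosV1 compararUsuariosV1 compararUsuariosV1_alt
  simp [pvConquerEq, pvFoldInv]
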